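-- pv_equiv track=rewrite | github.com/ch0c01dxyz/InCloudGitHub | report_generator.py | _group_by_repo
-- ===== SOURCE A (Python) =====
-- from typing import List, Dict, Optional
--
-- def _group_by_repo(scan_results: List[Dict]) -> Dict[str, List[Dict]]:
--     """
--     Group scan results by repository
--
--     Args:
--         scan_results: List of scan results
--
--     Returns:
--         Dictionary of results grouped by repository
--     """
--     grouped = {}
--     for result in scan_results:
--         repo_url = result.get('repo_url', 'Unknown')
--         if repo_url not in grouped:
--             grouped[repo_url] = []
--         grouped[repo_url].append(result)
--     return grouped
-- ===== SOURCE B (Python) =====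
-- from typing import List, Dict
--
-- def _group_by_repo(scan_results: List[Dict]) -> Dict[str, List[Dict]]:
--     """Group scan results by repository (two-pass: ordered key list, then one filter per key)."""
--     keys = list(dict.fromkeys(r.get('repo_url', 'Unknown') for r in scan_results))
--     return {k: [r for r in scan_results if r.get('repo_url', 'Unknown') == k] for k in keys}
-- ===== Notes on version B (the rewrite author's own statement) =====
-- stated objective: alternative
-- what changed: Replaces A's single-pass incremental bucket dict (insert empty bucket on first sight, then append) with a two-pass scheme: build the ordered list of distinct keys via dict.fromkeys, then produce each group with one filter comprehension over the input per key.
import Mathlib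
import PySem

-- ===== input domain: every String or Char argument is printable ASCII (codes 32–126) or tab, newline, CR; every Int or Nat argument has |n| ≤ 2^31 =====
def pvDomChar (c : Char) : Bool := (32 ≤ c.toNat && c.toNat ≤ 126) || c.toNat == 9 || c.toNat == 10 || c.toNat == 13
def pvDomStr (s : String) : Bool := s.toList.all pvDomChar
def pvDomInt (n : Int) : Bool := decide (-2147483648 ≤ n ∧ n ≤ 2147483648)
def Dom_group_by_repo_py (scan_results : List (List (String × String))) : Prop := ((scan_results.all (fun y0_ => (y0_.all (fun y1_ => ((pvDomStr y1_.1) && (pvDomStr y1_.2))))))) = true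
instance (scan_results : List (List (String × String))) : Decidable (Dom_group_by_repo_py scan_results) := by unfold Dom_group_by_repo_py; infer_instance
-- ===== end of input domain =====

-- B replaces A's incremental bucket-insertion dict loop by a two-pass scheme (ordered
-- unique key list, then one filter per key); objective: alternative decomposition, not faster.

-- ===== PORT A =====
-- A: one pass, inserting an empty bucket on first sight of a key and appending to it.
def group_by_repo_py (scan_results : List (List (String × String))) : List (String × List (List (String × String))) :=
  (scan_results.foldl
    (fun grouped result =>
      let repo_url := (PySem.Dict.mk result).getD "repo_url" "Unknown"
      let grouped := if grouped.contains repo_url then grouped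
                     else grouped.insert repo_url ([] : List (List (String × String)))
      grouped.modify repo_url [] (fun l => l ++ [result]))
    PySem.Dict.empty).items

-- ===== PORT B =====
-- B-side helper: the grouping key of one result.
def gbKey (result : List (String × String)) : String :=
  (PySem.Dict.mk result).getD "repo_url" "Unknown"

def group_by_repo_py_alt (scan_results : List (List (String × String))) : List (String × List (List (String × String))) :=
  (PySem.List.dedup (scan_results.map gbKey)).map
    (fun k => (k, scan_results.filter (fun r => gbKey r == k)))

-- ===== PRECONDITION & SPEC =====
def Spec_group_by_repo_py (scan_results : List (List (String × String))) (out : List (String × List (List (String × String)))) : Prop := out = group_by_repo_py_alt scan_results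
instance (scan_results : List (List (String × String))) (out : List (String × List (List (String × String)))) : Decidable (Spec_group_by_repo_py scan_results out) := by unfold Spec_group_by_repo_py; infer_instance

-- ===== CLAIM (what is proved, stated in full; the proofs are below) =====
def Claim_equal_group_by_repo_py : Prop := ∀ (scan_results : List (List (String × String))), Dom_group_by_repo_py scan_results → Spec_group_by_repo_py scan_results (group_by_repo_py scan_results)

-- ===== LEMMAS AND PROOFS =====

-- A's "insert empty bucket if absent, then append" is one Dict.modify step.
theorem gb_step_eq (g : PySem.Dict String (List (List (String × String)))) (k : String)
    (r : List (String × String)) :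
    ((if g.contains k then g else g.insert k ([] : List (List (String × String)))).modify k []
      (fun l => l ++ [r])) = g.modify k [] (fun l => l ++ [r]) := by
  cases hc : g.contains k with
  | true => simp
  | false =>
    simp only [Bool.false_eq_true, if_false, PySem.Dict.modify,
      PySem.Dict.getD_insert_self, PySem.Dict.insert_insert_self,
      PySem.Dict.getD_of_not_contains g ([] : List (List (String × String))) hc, List.nil_append]

theorem gb_foldl_eq (scan_results : List (List (String × String))) :
    scan_results.foldl
      (fun grouped result =>
        let repo_url := (PySem.Dict.mk result).getD "repo_url" "Unknown"
        let grouped := if grouped.contains repo_url then grouped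
                       else grouped.insert repo_url ([] : List (List (String × String)))
        grouped.modify repo_url [] (fun l => l ++ [result]))
      PySem.Dict.empty
    = scan_results.foldl (fun d r => d.modify (gbKey r) [] (fun l => l ++ [r])) PySem.Dict.empty := by
  exact PySem.List.foldl_congr_mem _ _ _ _ (fun g r _ => gb_step_eq g (gbKey r) r)

theorem gb_main (scan_results : List (List (String × String))) :
    group_by_repo_py scan_results = group_by_repo_py_alt scan_results := by
  unfold group_by_repo_py group_by_repo_py_alt
  rw [gb_foldl_eq]
  set d := scan_results.foldl (fun d r => d.modify (gbKey r) [] (fun l => l ++ [r])) PySem.Dict.empty with hd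
  have hnd : d.keys.Nodup := by
    rw [hd]
    exact PySem.Dict.nodup_keys_foldl_modify_key scan_results gbKey []
      (fun _ x => (fun l => l ++ [x])) PySem.Dict.empty (by simp [PySem.Dict.keys_empty])
  have hkeys : d.keys = PySem.Set.ofList (scan_results.map gbKey) := by
    rw [hd, PySem.Dict.keys_foldl_modify_key scan_results gbKey []
      (fun _ x => (fun l => l ++ [x])) PySem.Dict.empty]
    simp [PySem.Dict.keys_empty, PySem.Set.update_nil_left]
  have hget : ∀ c, d.getD c [] = scan_results.filter (fun r => gbKey r == c) := by
    intro c
    have hmap : d = (scan_results.map (fun r => (gbKey r, r))).foldl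
        (fun d p => d.modify p.1 [] (fun l => l ++ [p.2])) PySem.Dict.empty := by
      rw [hd, List.foldl_map]
    rw [hmap, PySem.Dict.getD_foldl_modify_append]
    simp [PySem.Dict.getD_empty, List.filter_map, Function.comp_def]
  rw [PySem.Dict.items_eq_map_keys d hnd [], hkeys, PySem.List.dedup_eq_ofList]
  simp only [hget]

-- ===== VERDICT (by name: the statement is the Claim_ definition above) =====
theorem group_by_repo_py_spec : Claim_equal_group_by_repo_py := by
  intro scan_results _
  exact gb_main scan_results
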